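-- pv_equiv track=rewrite | github.com/genialis/resolwe | resolwe/flow/models/fields.py | convert_version_string_to_int
-- ===== SOURCE A (Python) =====
-- def convert_version_string_to_int(string: str, number_bits: list[int]) -> int:
--     """Convert string version to int version.
--
--     Take in a verison string e.g. '3.0.1'
--     Store it as a converted int:
--     3 * (2**number_bits[0]) + 0 * (2**number_bits[1]) + 1 * (2**number_bits[2])
--
--     >>> convert_version_string_to_int('3.0.1',[8,8,16])
--     50331649
--     """
--     # This is needed for using Version as a type in pydantic
--     if string == Ellipsis:
--         return string
--
--     numbers = [int(number_string) for number_string in string.split(".")]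
--
--     if len(numbers) > len(number_bits):
--         raise NotImplementedError(
--             "Versions with more than {0} decimal places are not supported".format(
--                 len(number_bits) - 1
--             )
--         )
--
--     # add 0s for missing numbers
--     numbers.extend([0] * (len(number_bits) - len(numbers)))
--
--     # convert to single int and return
--     number = 0
--     total_bits = 0
--     for num, bits in reversed(list(zip(numbers, number_bits))):
--         max_num = (bits + 1) - 1
--         if num >= 1 << max_num:
--             raise ValueError(
--                 "Number {0} cannot be stored with only {1} bits. Max is {2}".format(
--                     num, bits, max_num
--                 )
--             )
--         number += num << total_bits
--         total_bits += bits
--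
--     return number
-- ===== SOURCE B (Python) =====
-- def convert_version_string_to_int(string: str, number_bits: list[int]) -> int:
--     """Convert string version to int version (forward Horner build)."""
--     if string == Ellipsis:
--         return string
--
--     numbers = [int(number_string) for number_string in string.split(".")]
--
--     if len(numbers) > len(number_bits):
--         raise NotImplementedError(
--             "Versions with more than {0} decimal places are not supported".format(
--                 len(number_bits) - 1
--             )
--         )
--
--     numbers += [0] * (len(number_bits) - len(numbers))
--
--     # validate in reversed order so the first error reported matches A's loop
--     for num, bits in reversed(list(zip(numbers, number_bits))):
--         if num >= 1 << bits:
--             raise ValueError(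
--                 "Number {0} cannot be stored with only {1} bits. Max is {2}".format(
--                     num, bits, bits
--                 )
--             )
--
--     # forward Horner pass: no total_bits accumulator, no reversed build
--     number = 0
--     for num, bits in zip(numbers, number_bits):
--         number = (number << bits) + num
--     return number
-- ===== Notes on version B (the rewrite author's own statement) =====
-- stated objective: alternative
-- what changed: Replaces A's reversed accumulation with a running total_bits shift counter by a separate reversed validation pass followed by a forward Horner pass (number = (number << bits) + num), eliminating the total_bits accumulator and the reversed build.
import Mathlib
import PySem

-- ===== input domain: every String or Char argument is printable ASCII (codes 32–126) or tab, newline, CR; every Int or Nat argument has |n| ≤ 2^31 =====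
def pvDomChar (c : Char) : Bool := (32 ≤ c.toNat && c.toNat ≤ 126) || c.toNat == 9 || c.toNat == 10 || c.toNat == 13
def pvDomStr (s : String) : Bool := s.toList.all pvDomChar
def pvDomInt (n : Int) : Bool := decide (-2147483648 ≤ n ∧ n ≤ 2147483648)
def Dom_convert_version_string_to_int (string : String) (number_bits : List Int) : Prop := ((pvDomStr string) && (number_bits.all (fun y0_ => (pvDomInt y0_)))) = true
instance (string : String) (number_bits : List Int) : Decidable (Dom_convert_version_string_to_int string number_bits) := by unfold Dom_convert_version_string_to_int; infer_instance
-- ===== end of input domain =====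

-- B replaces A's reversed build with a running total_bits by a forward Horner pass (alternative decomposition, same cost).

-- Python `x << k` for k ≥ 0 (all shifts inside Pre_ have k ≥ 0; k < 0 raises in Python, outside Pre_)
def pvShift (x : Int) (k : Int) : Int := x * 2 ^ k.toNat

-- ===== PORT A =====
-- `if string == Ellipsis` is always False for a str argument, so it is dropped in the port.
def convAStep (st : Int × Int) (p : Int × Int) : Int × Int :=
  let max_num := p.2 + 1 - 1
  if p.1 ≥ pvShift 1 max_num then st   -- Python raises ValueError here: outside Pre_
  else (st.1 + pvShift p.1 st.2, st.2 + p.2)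

def convert_version_string_to_int (string : String) (number_bits : List Int) : Int :=
  match (PySem.Chars.splitOn string.toList ['.']).mapM PySem.Int.ofChars? with
  | none => 0   -- int() raises ValueError: outside Pre_
  | some numbers =>
    if numbers.length > number_bits.length then 0   -- NotImplementedError: outside Pre_
    else
      let padded := numbers ++ List.replicate (number_bits.length - numbers.length) 0
      (((padded.zip number_bits).reverse).foldl convAStep (0, 0)).1

-- ===== PORT B =====
def convBCheck (p : Int × Int) : Bool := decide (p.1 < pvShift 1 p.2)

def convBStep (number : Int) (p : Int × Int) : Int := pvShift number p.2 + p.1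

def convert_version_string_to_int_alt (string : String) (number_bits : List Int) : Int :=
  match (PySem.Chars.splitOn string.toList ['.']).mapM PySem.Int.ofChars? with
  | none => 0   -- int() raises ValueError: outside Pre_
  | some numbers =>
    if _h : numbers.length ≤ number_bits.length then
      let pairs := (numbers ++ List.replicate (number_bits.length - numbers.length) 0).zip number_bits
      if pairs.reverse.all convBCheck then pairs.foldl convBStep 0
      else 0   -- reversed validation pass raises ValueError: outside Pre_
    else 0   -- NotImplementedError: outside Pre_

-- ===== PRECONDITION & SPEC =====
-- Pre_: every '.'-component parses as an int, there are at most as many components as bit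
-- widths, and each (zero-padded) component n with width b satisfies 0 ≤ b and n < 2^b;
-- otherwise Python A raises (ValueError or NotImplementedError).
def pvPreCheck (string : String) (number_bits : List Int) : Bool :=
  match (PySem.Chars.splitOn string.toList ['.']).mapM PySem.Int.ofChars? with
  | none => false
  | some numbers =>
    decide (numbers.length ≤ number_bits.length) &&
    ((numbers ++ List.replicate (number_bits.length - numbers.length) 0).zip number_bits).all
      (fun p => decide (0 ≤ p.2) && decide (p.1 < 2 ^ p.2.toNat))

def Pre_convert_version_string_to_int (string : String) (number_bits : List Int) : Prop :=
  pvPreCheck string number_bits = true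
instance (string : String) (number_bits : List Int) : Decidable (Pre_convert_version_string_to_int string number_bits) := by unfold Pre_convert_version_string_to_int; infer_instance

def pvWitness_convert_version_string_to_int : String × List Int := ("2.4", [5, 6, 7])

def Spec_convert_version_string_to_int (string : String) (number_bits : List Int) (out : Int) : Prop := out = convert_version_string_to_int_alt string number_bits
instance (string : String) (number_bits : List Int) (out : Int) : Decidable (Spec_convert_version_string_to_int string number_bits out) := by unfold Spec_convert_version_string_to_int; infer_instance

-- ===== CLAIM (what is proved, stated in full; the proofs are below) =====
def Claim_equal_convert_version_string_to_int : Prop := ∀ (string : String) (number_bits : List Int), Dom_convert_version_string_to_int string number_bits → Pre_convert_version_string_to_int string number_bits → Spec_convert_version_string_to_int string number_bits (convert_version_string_to_int string number_bits)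

-- ===== LEMMAS AND PROOFS =====

-- sum of the widths of a pair list
def pvSumB (l : List (Int × Int)) : Int := (l.map Prod.snd).sum

lemma pvSumB_nonneg (l : List (Int × Int)) (h : ∀ p ∈ l, 0 ≤ p.2) : 0 ≤ pvSumB l := by
  induction l with
  | nil => simp [pvSumB]
  | cons p t ih =>
    have hp := h p (List.mem_cons_self ..)
    have ht := ih (fun q hq => h q (List.mem_cons_of_mem _ hq))
    simp [pvSumB] at ht ⊢
    omega

-- forward Horner from an arbitrary accumulator
lemma horner_acc (l : List (Int × Int)) (h : ∀ p ∈ l, 0 ≤ p.2) (a : Int) :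
    l.foldl convBStep a = a * 2 ^ (pvSumB l).toNat + l.foldl convBStep 0 := by
  induction l generalizing a with
  | nil => simp [pvSumB]
  | cons p t ih =>
    have hp := h p (List.mem_cons_self ..)
    have ht : ∀ q ∈ t, 0 ≤ q.2 := fun q hq => h q (List.mem_cons_of_mem _ hq)
    have hS := pvSumB_nonneg t ht
    have hsum : pvSumB (p :: t) = p.2 + pvSumB t := by simp [pvSumB]
    have hpow : (2 : Int) ^ (pvSumB (p :: t)).toNat = 2 ^ p.2.toNat * 2 ^ (pvSumB t).toNat := by
      rw [← pow_add]
      congr 1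
      omega
    simp only [List.foldl_cons]
    rw [ih ht, ih ht (convBStep 0 p), hpow]
    simp [convBStep, pvShift]
    ring

-- A's reversed accumulating fold computes (forward Horner, total width)
lemma rev_fold_eq (l : List (Int × Int))
    (h : ∀ p ∈ l, 0 ≤ p.2 ∧ p.1 < 2 ^ p.2.toNat) :
    (l.reverse.foldl convAStep (0, 0)) = (l.foldl convBStep 0, pvSumB l) := by
  induction l with
  | nil => simp [pvSumB]
  | cons p t ih =>
    have hp := h p (List.mem_cons_self ..)
    have ht : ∀ q ∈ t, 0 ≤ q.2 ∧ q.1 < 2 ^ q.2.toNat := fun q hq => h q (List.mem_cons_of_mem _ hq)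
    have hrec := ih ht
    have hne : ¬ p.1 ≥ pvShift 1 (p.2 + 1 - 1) := by
      simp [pvShift]
      omega
    calc ((p :: t).reverse.foldl convAStep (0, 0))
        = convAStep (t.reverse.foldl convAStep (0, 0)) p := by
          simp
      _ = convAStep (t.foldl convBStep 0, pvSumB t) p := by rw [hrec]
      _ = ((p :: t).foldl convBStep 0, pvSumB (p :: t)) := by
          simp only [convAStep, if_neg hne, Prod.mk.injEq]
          constructor
          · simp only [List.foldl_cons]
            rw [horner_acc t (fun q hq => (ht q hq).1) (convBStep 0 p)]
            simp [convBStep, pvShift]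
            ring
          · simp [pvSumB]
            omega

-- ===== VERDICT (by name: the statement is the Claim_ definition above) =====
theorem convert_version_string_to_int_spec : Claim_equal_convert_version_string_to_int := by
  intro string number_bits _hDom hPre
  unfold Spec_convert_version_string_to_int
  unfold Pre_convert_version_string_to_int pvPreCheck at hPre
  unfold convert_version_string_to_int convert_version_string_to_int_alt
  cases hsplit : (PySem.Chars.splitOn string.toList ['.']).mapM PySem.Int.ofChars? with
  | none => simp [hsplit] at hPre
  | some numbers =>
    rw [hsplit] at hPre
    simp only [Bool.and_eq_true, decide_eq_true_eq, List.all_eq_true] at hPre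
    obtain ⟨hlen, hall⟩ := hPre
    have hall' : ∀ p ∈ (numbers ++ List.replicate (number_bits.length - numbers.length) 0).zip number_bits,
        0 ≤ p.2 ∧ p.1 < 2 ^ p.2.toNat := by
      intro p hp
      have := hall p hp
      simp at this
      exact this
    dsimp only
    rw [dif_pos hlen, if_neg (by omega)]
    have hchk : (((numbers ++ List.replicate (number_bits.length - numbers.length) 0).zip number_bits).reverse).all convBCheck = true := by
      simp only [List.all_eq_true]
      intro p hp
      rw [List.mem_reverse] at hp
      have := (hall' p hp).2
      simp [convBCheck, pvShift]
      omega
    rw [if_pos hchk]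
    exact congrArg Prod.fst (rev_fold_eq _ hall')
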